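-- pv_equiv track=rewrite | github.com/DrDos0016/museum-of-zzt | museum_site/core/misc.py | calculate_sort_title
-- ===== SOURCE A (Python) =====
-- def calculate_sort_title(string):
--     output = ""
--     # Handle titles that start with A/An/The
--     sort_title = string.lower()
--
--     if sort_title.startswith(("a ", "an ", "the ")):
--         sort_title = sort_title[sort_title.find(" ") + 1:]
--
--     # Expand numbers
--     digits = 0  # Digits in number
--     number = ""  # The actual number
--     for idx in range(0, len(sort_title)):
--         ch = sort_title[idx]
--         if ch in "0123456789":
--             digits += 1
--             number += ch
--             continue
--         else:
--             if digits == 0: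
--                 output += sort_title[idx]
--             else:
--                 padded_digits = "00000{}".format(number)[-5:]
--                 output += padded_digits + sort_title[idx]
--                 digits = 0
--                 number = ""
--     # Finale
--     if digits != 0:
--         padded_digits = "00000{}".format(number)[-5:]
--         output += padded_digits
--
--     return output
-- ===== SOURCE B (Python) =====
-- def calculate_sort_title(string):
--     # Strip a leading article, as in the original.
--     sort_title = string.lower()
--     if sort_title.startswith(("a ", "an ", "the ")):
--         sort_title = sort_title[sort_title.find(" ") + 1:]
--     # Replace each maximal run of ASCII digits with its 5-char zero-padded
--     # (last-5-truncated) form, collecting pieces and joining once.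
--     parts = []
--     i, n = 0, len(sort_title)
--     while i < n:
--         if '0' <= sort_title[i] <= '9':
--             j = i
--             while j < n and '0' <= sort_title[j] <= '9':
--                 j += 1
--             parts.append(('00000' + sort_title[i:j])[-5:])
--             i = j
--         else:
--             parts.append(sort_title[i])
--             i += 1
--     return ''.join(parts)
-- ===== Notes on version B (the rewrite author's own statement) =====
-- stated objective: alternative
-- what changed: Replaces the char-by-char loop that maintains a digit counter and number buffer across iterations by a run-based two-pointer scan: each maximal ASCII-digit run is located whole, padded in one slice, and the pieces are joined once.
import Mathlib
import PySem

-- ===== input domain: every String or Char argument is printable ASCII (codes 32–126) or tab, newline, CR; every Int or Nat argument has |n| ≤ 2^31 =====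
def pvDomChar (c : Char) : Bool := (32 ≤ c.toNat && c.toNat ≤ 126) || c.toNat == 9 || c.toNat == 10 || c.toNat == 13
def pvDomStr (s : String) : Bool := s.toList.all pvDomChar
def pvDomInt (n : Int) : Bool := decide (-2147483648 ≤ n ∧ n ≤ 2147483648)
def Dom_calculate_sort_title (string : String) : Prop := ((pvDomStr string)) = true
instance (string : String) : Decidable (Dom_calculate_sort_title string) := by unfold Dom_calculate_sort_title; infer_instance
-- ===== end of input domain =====

-- B replaces A's char-by-char digit accumulator by a run-based two-pointer scan with a
-- single join; same return value on every input (both are total).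

-- Shared by both ports (both Pythons contain these identical two lines):
-- sort_title = string.lower(); if it starts with "a "/"an "/"the ", drop through the first space.
def pvStripArticle (s : String) : List Char :=
  let sort_title := (PySem.Str.lower s).toList
  if PySem.Chars.startswith sort_title "a ".toList ||
     PySem.Chars.startswith sort_title "an ".toList ||
     PySem.Chars.startswith sort_title "the ".toList then
    PySem.List.slice sort_title (some (PySem.Chars.find sort_title " ".toList + 1)) none
  else sort_title

-- "00000{}".format(number)[-5:]
def pvLastFive (number : List Char) : List Char :=
  PySem.List.slice ("00000".toList ++ number) (some (-5)) none

-- ===== PORT A =====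
-- the loop body: state = (output, digits, number); `ch in "0123456789"`
def pvStepA (s : List Char × Int × List Char) (ch : Char) : List Char × Int × List Char :=
  let output := s.1; let digits := s.2.1; let number := s.2.2
  if ("0123456789".toList).contains ch then
    (output, digits + 1, number ++ [ch])
  else if digits == 0 then
    (output ++ [ch], digits, number)
  else
    (output ++ pvLastFive number ++ [ch], 0, ([] : List Char))

-- the finale after the loop
def pvFinishA (st : List Char × Int × List Char) : List Char :=
  if st.2.1 != 0 then st.1 ++ pvLastFive st.2.2 else st.1

-- for idx in range(len(sort_title)): ch = sort_title[idx]  — reading s[idx] for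
-- idx = 0..len-1 visits exactly the characters in order, so it is a left fold over them.
def calculate_sort_title (string : String) : String :=
  let sort_title := pvStripArticle string
  let st := sort_title.foldl pvStepA (([] : List Char), (0 : Int), ([] : List Char))
  String.ofList (pvFinishA st)

-- ===== PORT B =====
-- '0' <= ch <= '9'
def pvIsDig (c : Char) : Bool := decide ('0' ≤ c ∧ c ≤ '9')

-- the two-pointer run scan: a maximal digit run is taken whole and padded in one step,
-- every other character passes through; pieces are concatenated (the single join)
def pvRunScan : List Char → List Char
  | [] => []
  | c :: rest =>
    if pvIsDig c then
      pvLastFive (c :: rest.takeWhile pvIsDig) ++ pvRunScan (rest.dropWhile pvIsDig)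
    else
      c :: pvRunScan rest
termination_by l => l.length
decreasing_by
  · simpa using Nat.lt_succ_of_le (List.length_dropWhile_le pvIsDig rest)
  · simp

def calculate_sort_title_alt (string : String) : String :=
  String.ofList (pvRunScan (pvStripArticle string))

-- ===== PRECONDITION & SPEC =====
def Spec_calculate_sort_title (string : String) (out : String) : Prop := out = calculate_sort_title_alt string
instance (string : String) (out : String) : Decidable (Spec_calculate_sort_title string out) := by unfold Spec_calculate_sort_title; infer_instance

-- ===== CLAIM (what is proved, stated in full; the proofs are below) =====
def Claim_equal_calculate_sort_title : Prop := ∀ (string : String), Dom_calculate_sort_title string → Spec_calculate_sort_title string (calculate_sort_title string)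

-- ===== LEMMAS AND PROOFS =====

-- ghost intermediate: A's loop with its pending digit run made explicit, over B's digit test
def pvGhost (pending : List Char) : List Char → List Char
  | [] => if pending.isEmpty then [] else pvLastFive pending
  | c :: rest =>
    if pvIsDig c then pvGhost (pending ++ [c]) rest
    else (if pending.isEmpty then [] else pvLastFive pending) ++ c :: pvGhost [] rest

-- A's membership test and B's range test agree on every Char
theorem pvDigEq (c : Char) : ("0123456789".toList).contains c = pvIsDig c := by
  rw [Bool.eq_iff_iff]
  simp only [pvIsDig, List.contains_iff_mem,
    show "0123456789".toList = ['0','1','2','3','4','5','6','7','8','9'] from rfl,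
    List.mem_cons, List.not_mem_nil, or_false, decide_eq_true_eq,
    Char.le_def, Char.ext_iff, UInt32.le_iff_toNat_le, UInt32.ext_iff]
  have h0 : '0'.val.toNat = 48 := by decide
  have h1 : '1'.val.toNat = 49 := by decide
  have h2 : '2'.val.toNat = 50 := by decide
  have h3 : '3'.val.toNat = 51 := by decide
  have h4 : '4'.val.toNat = 52 := by decide
  have h5 : '5'.val.toNat = 53 := by decide
  have h6 : '6'.val.toNat = 54 := by decide
  have h7 : '7'.val.toNat = 55 := by decide
  have h8 : '8'.val.toNat = 56 := by decide
  have h9 : '9'.val.toNat = 57 := by decide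
  omega

theorem pvALoop (l : List Char) : ∀ (out number : List Char),
    pvFinishA (l.foldl pvStepA (out, (number.length : Int), number))
      = out ++ pvGhost number l := by
  induction l with
  | nil =>
    intro out number
    cases number with
    | nil => simp [pvFinishA, pvGhost]
    | cons a as =>
      have h : (((a :: as).length : Int) != 0) = true := by simp; omega
      simp only [List.foldl_nil, pvFinishA, h, if_true, pvGhost, List.isEmpty_cons,
        Bool.false_eq_true, if_false]
  | cons c rest ih =>
    intro out number
    simp only [List.foldl_cons, pvStepA, pvDigEq, pvGhost]
    by_cases hd : pvIsDig c
    · simp only [hd, if_true]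
      have h := ih out (number ++ [c])
      simpa [List.length_append] using h
    · simp only [hd, Bool.false_eq_true, if_false]
      cases number with
      | nil =>
        simpa [List.append_assoc] using ih (out ++ [c]) []
      | cons a as =>
        have hne : ((((a :: as).length : Int)) == 0) = false := by simp; omega
        simp only [hne, Bool.false_eq_true, if_false, List.isEmpty_cons]
        simpa [List.append_assoc] using ih (out ++ pvLastFive (a :: as) ++ [c]) []

theorem pvGhost_spec (l : List Char) :
    (∀ pending, pending ≠ [] →
      pvGhost pending l = pvLastFive (pending ++ l.takeWhile pvIsDig) ++ pvRunScan (l.dropWhile pvIsDig))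
    ∧ pvGhost [] l = pvRunScan l := by
  induction l with
  | nil =>
    refine ⟨fun pending hp => ?_, by simp [pvGhost, pvRunScan]⟩
    simp [pvGhost, pvRunScan, List.isEmpty_iff, hp]
  | cons c rest ih =>
    by_cases hd : pvIsDig c
    · constructor
      · intro pending hp
        simp only [pvGhost, hd, if_true, List.takeWhile_cons, List.dropWhile_cons]
        rw [ih.1 (pending ++ [c]) (by simp)]
        simp
      · simp only [pvGhost, hd, if_true, List.nil_append]
        rw [ih.1 [c] (by simp)]
        simp [pvRunScan, hd]
    · constructor
      · intro pending hp
        simp only [pvGhost, hd, Bool.false_eq_true, if_false, List.takeWhile_cons,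
          List.dropWhile_cons, List.isEmpty_iff, hp]
        rw [ih.2]
        simp [pvRunScan, hd]
      · simp only [pvGhost, hd, Bool.false_eq_true, if_false, List.isEmpty_nil, if_true,
          List.nil_append]
        rw [ih.2]
        simp [pvRunScan, hd]

-- ===== VERDICT (by name: the statement is the Claim_ definition above) =====
theorem calculate_sort_title_spec : Claim_equal_calculate_sort_title := by
  intro s _
  unfold Spec_calculate_sort_title calculate_sort_title calculate_sort_title_alt
  show String.ofList (pvFinishA ((pvStripArticle s).foldl pvStepA ([], (0 : Int), [])))
      = String.ofList (pvRunScan (pvStripArticle s))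
  have h := pvALoop (pvStripArticle s) [] []
  simp only [List.length_nil, Nat.cast_zero, List.nil_append] at h
  rw [h, (pvGhost_spec (pvStripArticle s)).2]
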